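-- pv_equiv track=rewrite | github.com/jabalpureishan/LeetCode-and-GeeksForGeeks | Minimum steps to make product equal to one - GFG/minimum-steps-to-make-product-equal-to-one.py | makeProductOne
-- ===== SOURCE A (Python) =====
-- def makeProductOne(arr, N):
--     count = 0
--     prod = 1
--     for i in arr:
--         prod *= i
--         count += abs(abs(i)-1)
--     if prod<0:
--         count += 2
--     return count
-- ===== SOURCE B (Python) =====
-- def makeProductOne(arr, N):
--     # Closed form: per-element cost is |x|-1 for x != 0 and 1 for x == 0,
--     # so total = sum(|x|) - len(arr) + 2*zeros; a sign fix of +2 is needed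
--     # exactly when there is no zero and the number of negatives is odd.
--     zeros = arr.count(0)
--     steps = sum(abs(x) for x in arr) - len(arr) + 2 * zeros
--     if zeros == 0 and sum(1 for x in arr if x < 0) % 2 == 1:
--         steps += 2
--     return steps
-- ===== Notes on version B (the rewrite author's own statement) =====
-- stated objective: faster
-- what changed: B replaces A's single branch-and-accumulate loop over a growing big-int running product by staged built-in passes and an arithmetic identity: steps = sum(|x|) - len(arr) + 2*count(0), plus 2 when there is no zero and the count of negatives is odd.
import Mathlib
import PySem

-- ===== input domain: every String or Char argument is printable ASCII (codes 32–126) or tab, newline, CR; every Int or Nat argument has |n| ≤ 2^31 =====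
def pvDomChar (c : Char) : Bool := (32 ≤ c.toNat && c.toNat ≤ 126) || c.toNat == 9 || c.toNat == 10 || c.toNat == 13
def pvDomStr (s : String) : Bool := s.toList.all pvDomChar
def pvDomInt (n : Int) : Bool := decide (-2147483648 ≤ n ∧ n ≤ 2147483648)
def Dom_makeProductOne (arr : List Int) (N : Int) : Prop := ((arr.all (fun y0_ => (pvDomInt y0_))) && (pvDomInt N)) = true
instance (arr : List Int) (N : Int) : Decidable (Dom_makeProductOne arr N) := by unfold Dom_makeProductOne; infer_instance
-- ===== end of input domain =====

-- ===== PORT A =====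
def makeProductOne (arr : List Int) (N : Int) : Int :=
  let st := arr.foldl (fun (st : Int × Int) i => (st.1 * i, st.2 + |(|i| - 1)|)) (1, 0)
  if st.1 < 0 then st.2 + 2 else st.2

-- ===== PORT B =====
-- B replaces A's per-element cost loop over a growing big-int product by the closed form
-- sum(|x|) - len + 2*zeros plus a parity test on the count of negatives (faster).
def makeProductOne_alt (arr : List Int) (N : Int) : Int :=
  let zeros : Int := (PySem.List.count arr 0 : Int)
  let steps : Int := arr.foldl (fun (s : Int) x => s + |x|) 0 - (arr.length : Int) + 2 * zeros
  if zeros == 0 && (arr.foldl (fun (s : Int) x => if x < 0 then s + 1 else s) 0) % 2 == 1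
  then steps + 2 else steps

-- ===== PRECONDITION & SPEC =====
def Spec_makeProductOne (arr : List Int) (N : Int) (out : Int) : Prop := out = makeProductOne_alt arr N
instance (arr : List Int) (N : Int) (out : Int) : Decidable (Spec_makeProductOne arr N out) := by unfold Spec_makeProductOne; infer_instance

-- ===== CLAIM (what is proved, stated in full; the proofs are below) =====
def Claim_equal_makeProductOne : Prop := ∀ (arr : List Int) (N : Int), Dom_makeProductOne arr N → Spec_makeProductOne arr N (makeProductOne arr N)

-- ===== LEMMAS AND PROOFS =====

-- A's fold computes the running product and the sum of per-element costs ||i|-1|.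
lemma foldA_eq (arr : List Int) (p c : Int) :
    arr.foldl (fun (st : Int × Int) i => (st.1 * i, st.2 + |(|i| - 1)|)) (p, c)
      = (p * arr.prod, c + (arr.map (fun i => |(|i| - 1)|)).sum) := by
  induction arr generalizing p c with
  | nil => simp
  | cons i rest ih => simp [ih, mul_assoc, add_assoc]

-- B's first fold is the sum of absolute values.
lemma foldAbs_eq (arr : List Int) (s : Int) :
    arr.foldl (fun (s : Int) x => s + |x|) s = s + (arr.map (fun x => |x|)).sum := by
  induction arr generalizing s with
  | nil => simp
  | cons i rest ih => simp [ih, add_assoc]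

-- The per-element cost identity: Σ ||i|-1| = Σ|i| - len + 2 * (count of zeros).
lemma cost_closed_form (arr : List Int) :
    ((arr.map (fun i => |(|i| - 1)|)).sum : Int)
      = (arr.map (fun x => |x|)).sum - (arr.length : Int) + 2 * (arr.count 0 : Int) := by
  induction arr with
  | nil => simp
  | cons i rest ih =>
    by_cases hi : i = 0
    · subst hi
      simp only [List.map_cons, List.sum_cons, List.length_cons, List.count_cons_self]
      push_cast
      norm_num
      omega
    · have hc : ((i :: rest).count 0) = rest.count 0 := List.count_cons_of_ne hi
      simp only [List.map_cons, List.sum_cons, List.length_cons, hc]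
      have : |(|i| - 1)| = |i| - 1 := abs_of_nonneg (by
        have : (1:Int) ≤ |i| := Int.one_le_abs (by simpa using hi)
        omega)
      push_cast
      omega

-- The product of a zero-free list is negative iff the number of negatives is odd (and it is nonzero).
lemma prod_sign (arr : List Int) (h : (0:Int) ∉ arr) :
    arr.prod ≠ 0 ∧ (arr.prod < 0 ↔ (arr.countP (fun x => decide (x < 0))) % 2 = 1) := by
  induction arr with
  | nil => simp
  | cons i rest ih =>
    have hi : i ≠ 0 := fun hh => h (by simp [hh])
    obtain ⟨hne, hiff⟩ := ih (fun hh => h (List.mem_cons_of_mem _ hh))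
    constructor
    · simp [mul_ne_zero hi hne]
    · rcases lt_trichotomy i 0 with hneg | hz | hpos
      · have hcnt : ((i :: rest).countP (fun x => decide (x < 0))) = rest.countP (fun x => decide (x < 0)) + 1 := by
          simp [hneg]
        rw [List.prod_cons, hcnt]
        constructor
        · intro hlt
          have : ¬ rest.prod < 0 := by
            intro hr
            exact absurd hlt (not_lt.mpr (le_of_lt (mul_pos_of_neg_of_neg hneg hr)))
          have hr : 0 < rest.prod := lt_of_le_of_ne (not_lt.mp this) (Ne.symm hne)
          have : ¬ rest.countP (fun x => decide (x < 0)) % 2 = 1 := by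
            intro hodd
            exact absurd (hiff.mpr hodd) (not_lt.mpr (le_of_lt hr))
          omega
        · intro hodd
          have heven : rest.countP (fun x => decide (x < 0)) % 2 ≠ 1 := by omega
          have hr : 0 < rest.prod := lt_of_le_of_ne (not_lt.mp (fun hlt => heven (hiff.mp hlt))) (Ne.symm hne)
          exact mul_neg_of_neg_of_pos hneg hr
      · exact absurd hz hi
      · have hcnt : ((i :: rest).countP (fun x => decide (x < 0))) = rest.countP (fun x => decide (x < 0)) := by
          simp [not_lt.mpr (le_of_lt hpos)]
        rw [List.prod_cons, hcnt, ← hiff]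
        constructor
        · intro hlt
          by_contra hnr
          have hr : 0 < rest.prod := lt_of_le_of_ne (not_lt.mp hnr) (Ne.symm hne)
          exact absurd hlt (not_lt.mpr (le_of_lt (mul_pos hpos hr)))
        · intro hr
          exact mul_neg_of_pos_of_neg hpos hr

-- ===== VERDICT (by name: the statement is the Claim_ definition above) =====
theorem makeProductOne_spec : Claim_equal_makeProductOne := by
  intro arr N _
  unfold Spec_makeProductOne makeProductOne makeProductOne_alt
  simp only [foldA_eq, one_mul, zero_add, foldAbs_eq, PySem.List.count_eq, zero_add]
  rw [cost_closed_form, PySem.List.foldl_ite_add_one]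
  by_cases hz : (0:Int) ∈ arr
  · have hc0 : arr.count 0 ≠ 0 := fun h => (List.count_eq_zero.mp h) hz
    have hp0 : arr.prod = 0 := List.prod_eq_zero hz
    have hB : ((arr.count 0 : Int) == 0) = false := by
      rw [beq_eq_false_iff_ne]
      exact_mod_cast hc0
    rw [hp0, if_neg (lt_irrefl (0:Int)), hB, Bool.false_and, if_neg (by simp)]
  · have hc0 : arr.count 0 = 0 := List.count_eq_zero.mpr hz
    obtain ⟨hne, hiff⟩ := prod_sign arr hz
    have hB : ((arr.count 0 : Int) == 0) = true := by simp [hc0]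
    rw [hB, Bool.true_and]
    by_cases hodd : (arr.countP (fun x => decide (x < 0))) % 2 = 1
    · have hcast : (((0 : Int) + (arr.countP (fun x => decide (x < 0)) : Int)) % 2 == 1) = true := by
        simp only [beq_iff_eq]; omega
      rw [hcast, if_pos (hiff.mpr hodd), if_pos rfl]
    · have hcast : (((0 : Int) + (arr.countP (fun x => decide (x < 0)) : Int)) % 2 == 1) = false := by
        rw [beq_eq_false_iff_ne]; omega
      have hnp : ¬ arr.prod < 0 := fun hlt => hodd (hiff.mp hlt)
      rw [hcast, if_neg hnp, if_neg (by simp)]
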